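-- pv_equiv track=rewrite | github.com/yjpark1/steben | baselines/pointer_network/eval.py | cal_feasibility
-- ===== SOURCE A (Python) =====
-- def cal_feasibility(edges, terminals):
--     nodes = dict()
--     def find(x):
--         if nodes[x] != x:
--             return find(nodes[x])
--         return x
--
--     def union(a, b):
--         a = find(a)
--         b = find(b)
--         if a < b:
--             nodes[b] = a
--         else:
--             nodes[a] = b
--
--     for n1, n2 in edges:
--         if n1 not in nodes.keys():
--             nodes[n1] = n1
--         if n2 not in nodes.keys():
--             nodes[n2] = n2
--         union(n1, n2)
--
--     roots = []
--     for t in terminals: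
--         if t not in nodes.keys():
--             nodes[t] = t
--         roots.append(find(t))
--     if len(list(set(roots))) == 1:
--         return True
--     return False
-- ===== SOURCE B (Python) =====
-- def cal_feasibility(edges, terminals):
--     # rep maps every node seen in edges to the smallest node of its component
--     rep = {}
--     for a, b in edges:
--         ra = rep.get(a, a)
--         rb = rep.get(b, b)
--         m = ra if ra < rb else rb
--         rep = {k: (m if v == ra or v == rb else v) for k, v in rep.items()}
--         rep[a] = m
--         rep[b] = m
--     if not terminals:
--         return False
--     r0 = rep.get(terminals[0], terminals[0])
--     return all(rep.get(t, t) == r0 for t in terminals)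
-- ===== Notes on version B (the rewrite author's own statement) =====
-- stated objective: simpler
-- what changed: A's recursive union-find forest (parent pointers, recursive find without path compression, union by smaller root) is replaced by a flat node-to-representative dictionary that is eagerly relabelled at each edge, so every representative lookup is a single O(1) dict access with no recursion.
import Mathlib
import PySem

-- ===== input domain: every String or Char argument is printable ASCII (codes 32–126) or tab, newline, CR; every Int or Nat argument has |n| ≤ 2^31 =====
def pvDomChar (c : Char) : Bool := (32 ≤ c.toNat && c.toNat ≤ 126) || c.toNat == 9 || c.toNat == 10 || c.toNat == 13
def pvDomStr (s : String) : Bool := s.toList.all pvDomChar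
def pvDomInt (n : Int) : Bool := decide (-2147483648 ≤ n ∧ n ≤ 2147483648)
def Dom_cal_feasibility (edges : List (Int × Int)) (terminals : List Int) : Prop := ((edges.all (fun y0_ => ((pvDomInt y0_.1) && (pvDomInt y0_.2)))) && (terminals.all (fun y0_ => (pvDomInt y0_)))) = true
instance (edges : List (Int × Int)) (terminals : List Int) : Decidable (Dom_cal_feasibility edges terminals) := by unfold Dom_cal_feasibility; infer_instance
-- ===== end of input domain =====

-- B replaces A's recursive union-find forest by a flat node→representative map that is
-- relabelled eagerly at each edge (objective: simpler — no recursion, no parent chains).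

-- ===== PORT A =====
-- A's recursive `find` follows parent pointers to the root.  In the Python it is only ever
-- called on keys of `nodes`, whose parent chains strictly decrease, so a fuel of
-- `nodes.size + 1` never runs out on those calls; the `none` / fuel-0 fallbacks are dead code.
def pvFindA (nodes : PySem.Dict Int Int) : Nat → Int → Int
  | 0, x => x
  | fuel + 1, x =>
    match nodes.get? x with
    | none => x
    | some p => if p ≠ x then pvFindA nodes fuel p else x

def pvUnionA (nodes : PySem.Dict Int Int) (a b : Int) : PySem.Dict Int Int :=
  let a := pvFindA nodes (nodes.size + 1) a
  let b := pvFindA nodes (nodes.size + 1) b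
  if a < b then nodes.insert b a else nodes.insert a b

def cal_feasibility (edges : List (Int × Int)) (terminals : List Int) : Bool :=
  let nodes : PySem.Dict Int Int :=
    edges.foldl (fun nodes e =>
      let nodes := if nodes.contains e.1 then nodes else nodes.insert e.1 e.1
      let nodes := if nodes.contains e.2 then nodes else nodes.insert e.2 e.2
      pvUnionA nodes e.1 e.2) PySem.Dict.empty
  let st := terminals.foldl (fun (st : PySem.Dict Int Int × List Int) t =>
      let nodes := if st.1.contains t then st.1 else st.1.insert t t
      (nodes, st.2 ++ [pvFindA nodes (nodes.size + 1) t])) (nodes, [])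
  if (PySem.Set.ofList st.2).length = 1 then true else false

-- ===== PORT B =====
def pvStepB (rep : PySem.Dict Int Int) (a b : Int) : PySem.Dict Int Int :=
  let ra := rep.getD a a
  let rb := rep.getD b b
  let m := if ra < rb then ra else rb
  let rep : PySem.Dict Int Int :=
    PySem.Dict.mk (rep.items.map (fun kv => (kv.1, if kv.2 = ra ∨ kv.2 = rb then m else kv.2)))
  (rep.insert a m).insert b m

def cal_feasibility_alt (edges : List (Int × Int)) (terminals : List Int) : Bool :=
  let rep : PySem.Dict Int Int :=
    edges.foldl (fun rep e => pvStepB rep e.1 e.2) PySem.Dict.empty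
  match terminals with
  | [] => false
  | t0 :: _ =>
    let r0 := rep.getD t0 t0
    terminals.all (fun t => rep.getD t t == r0)

-- ===== PRECONDITION & SPEC =====
def Spec_cal_feasibility (edges : List (Int × Int)) (terminals : List Int) (out : Bool) : Prop := out = cal_feasibility_alt edges terminals
instance (edges : List (Int × Int)) (terminals : List Int) (out : Bool) : Decidable (Spec_cal_feasibility edges terminals out) := by unfold Spec_cal_feasibility; infer_instance

-- ===== CLAIM (what is proved, stated in full; the proofs are below) =====
def Claim_equal_cal_feasibility : Prop := ∀ (edges : List (Int × Int)) (terminals : List Int), Dom_cal_feasibility edges terminals → Spec_cal_feasibility edges terminals (cal_feasibility edges terminals)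

-- ===== LEMMAS AND PROOFS =====

-- the forest invariant: unique keys, every parent is a key, parents never increase
def pvInv (d : PySem.Dict Int Int) : Prop :=
  d.keys.Nodup ∧ ∀ kv ∈ d.items, kv.2 ≤ kv.1 ∧ d.contains kv.2 = true

-- chain measure: number of keys strictly below x
def pvMu (d : PySem.Dict Int Int) (x : Int) : Nat :=
  (d.keys.filter (fun k => decide (k < x))).length

def pvRoot (d : PySem.Dict Int Int) (x : Int) : Int := pvFindA d (d.size + 1) x

lemma pvMu_le_size (d : PySem.Dict Int Int) (x : Int) : pvMu d x ≤ d.size := by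
  calc pvMu d x ≤ d.keys.length := List.length_filter_le _ _
    _ = d.size := by simp [PySem.Dict.keys, PySem.Dict.size]

lemma pvMu_lt (d : PySem.Dict Int Int) (hI : pvInv d) {x p : Int}
    (h : d.get? x = some p) (hne : p ≠ x) : pvMu d p < pvMu d x := by
  have hmem : (x, p) ∈ d.items := PySem.Dict.mem_items_of_get?_eq_some d h
  obtain ⟨hle, hct⟩ := hI.2 _ hmem
  have hpx : p < x := lt_of_le_of_ne hle hne
  have hpk : p ∈ d.keys := (PySem.Dict.contains_iff_mem_keys d p).mp hct
  have hsub : d.keys.filter (fun k => decide (k < p))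
      = (d.keys.filter (fun k => decide (k < x))).filter (fun k => decide (k < p)) := by
    rw [List.filter_filter]
    apply List.filter_congr
    intro k _
    by_cases hk : k < p
    · simp [hk, lt_trans hk hpx]
    · simp [hk]
  have hlt : ((d.keys.filter (fun k => decide (k < x))).filter (fun k => decide (k < p))).length
      < (d.keys.filter (fun k => decide (k < x))).length := by
    rw [List.length_filter_lt_length_iff_exists]
    exact ⟨p, by simp [List.mem_filter, hpk, hpx], by simp⟩
  unfold pvMu
  rw [hsub]
  exact hlt

lemma pvFindA_fuel (d : PySem.Dict Int Int) (hI : pvInv d) :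
    ∀ (f₁ : Nat) (x : Int) (f₂ : Nat), pvMu d x < f₁ → pvMu d x < f₂ →
      pvFindA d f₁ x = pvFindA d f₂ x := by
  intro f₁
  induction f₁ with
  | zero => intro x f₂ h1 _; omega
  | succ f ih =>
    intro x f₂ h1 h2
    cases f₂ with
    | zero => omega
    | succ g =>
      simp only [pvFindA]
      cases hx : d.get? x with
      | none => rfl
      | some p =>
        by_cases hpx : p = x
        · simp [hpx]
        · simp only [hpx, ne_eq, not_false_eq_true, if_pos]
          have hmu := pvMu_lt d hI hx hpx
          exact ih p g (by omega) (by omega)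

lemma pvRoot_eq_findA (d : PySem.Dict Int Int) (hI : pvInv d) (x : Int) {f : Nat}
    (hf : pvMu d x < f) : pvRoot d x = pvFindA d f x := by
  exact pvFindA_fuel d hI (d.size + 1) x f
    (Nat.lt_succ_of_le (pvMu_le_size d x)) hf

-- one unfolding of pvRoot
lemma pvRoot_unfold (d : PySem.Dict Int Int) (hI : pvInv d) (x : Int) :
    pvRoot d x = match d.get? x with
      | none => x
      | some p => if p = x then x else pvRoot d p := by
  have hle := pvMu_le_size d x
  conv_lhs => rw [pvRoot]
  simp only [pvFindA]
  cases hx : d.get? x with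
  | none => rfl
  | some p =>
    by_cases hpx : p = x
    · simp [hpx]
    · simp only [hpx, ne_eq, not_false_eq_true, if_pos, if_neg]
      have hmu := pvMu_lt d hI hx hpx
      exact (pvRoot_eq_findA d hI p (f := d.size) (by omega)).symm

lemma pvRoot_of_not_contains (d : PySem.Dict Int Int) (hI : pvInv d) {x : Int}
    (h : d.contains x = false) : pvRoot d x = x := by
  rw [pvRoot_unfold d hI x, (PySem.Dict.get?_eq_none_iff_contains d x).mpr h]

lemma pvRoot_is_root (d : PySem.Dict Int Int) (hI : pvInv d) {x : Int}
    (h : d.contains x = true) : d.get? (pvRoot d x) = some (pvRoot d x) := by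
  have H : ∀ n x, pvMu d x = n → d.contains x = true →
      d.get? (pvRoot d x) = some (pvRoot d x) := by
    intro n
    induction n using Nat.strong_induction_on with
    | _ n ih =>
      intro x hn hc
      rw [pvRoot_unfold d hI x]
      cases hx : d.get? x with
      | none =>
        rw [PySem.Dict.get?_eq_none_iff_contains] at hx
        rw [hx] at hc; cases hc
      | some p =>
        show d.get? (if p = x then x else pvRoot d p) = some (if p = x then x else pvRoot d p)
        by_cases hpx : p = x
        · rw [if_pos hpx, hx, hpx]
        · rw [if_neg hpx]
          have hmu := pvMu_lt d hI hx hpx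
          have hcp : d.contains p = true :=
            (hI.2 _ (PySem.Dict.mem_items_of_get?_eq_some d hx)).2
          exact ih _ (hn ▸ hmu) p rfl hcp
  exact H _ x rfl h

-- inserting a fresh self-loop changes no pvFindA value, at any fuel
lemma pvFindA_insert_self (d : PySem.Dict Int Int) {t : Int} (h : d.contains t = false) :
    ∀ (f : Nat) (x : Int), pvFindA (d.insert t t) f x = pvFindA d f x := by
  intro f
  induction f with
  | zero => intro x; rfl
  | succ g ih =>
    intro x
    simp only [pvFindA]
    by_cases hxt : x = t
    · subst hxt
      rw [PySem.Dict.get?_insert_self, (PySem.Dict.get?_eq_none_iff_contains d x).mpr h]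
      simp
    · rw [PySem.Dict.get?_insert_of_ne d _ hxt]
      cases hx : d.get? x with
      | none => rfl
      | some p =>
        by_cases hpx : p = x
        · simp [hpx]
        · simp only [hpx, ne_eq, not_false_eq_true, if_pos]
          exact ih p

lemma pvInv_insert (d : PySem.Dict Int Int) (hI : pvInv d) {k v : Int}
    (hv : v = k ∨ d.contains v = true) (hle : v ≤ k) : pvInv (d.insert k v) := by
  constructor
  · exact PySem.Dict.nodup_keys_insert d k v hI.1
  · intro kv hkv
    rw [PySem.Dict.mem_items_insert] at hkv
    rcases hkv with rfl | ⟨hmem, hne⟩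
    · refine ⟨hle, ?_⟩
      rw [PySem.Dict.contains_insert]
      rcases hv with rfl | hv
      · simp
      · simp [hv]
    · obtain ⟨h1, h2⟩ := hI.2 _ hmem
      refine ⟨h1, ?_⟩
      rw [PySem.Dict.contains_insert]
      simp [h2]

lemma pvRoot_insert_self (d : PySem.Dict Int Int) (hI : pvInv d) {t : Int}
    (h : d.contains t = false) (x : Int) : pvRoot (d.insert t t) x = pvRoot d x := by
  have hsz : d.size ≤ (d.insert t t).size := by
    rw [PySem.Dict.size_insert]; split <;> omega
  calc pvRoot (d.insert t t) x = pvFindA d ((d.insert t t).size + 1) x :=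
        pvFindA_insert_self d h _ x
    _ = pvRoot d x :=
        (pvRoot_eq_findA d hI x (f := (d.insert t t).size + 1)
          (by have := pvMu_le_size d x; omega)).symm

-- the core redirect lemma: repointing root r to a smaller root r'
lemma pvRoot_redirect (d : PySem.Dict Int Int) (hI : pvInv d) {r r' : Int}
    (hr : d.get? r = some r) (hr' : d.get? r' = some r') (hlt : r' < r) (x : Int) :
    pvRoot (d.insert r r') x = if pvRoot d x = r then r' else pvRoot d x := by
  have hctr : d.contains r = true := by
    rw [PySem.Dict.contains_eq_isSome_get?, hr]; rfl
  have hctr' : d.contains r' = true := by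
    rw [PySem.Dict.contains_eq_isSome_get?, hr']; rfl
  have hI' : pvInv (d.insert r r') := pvInv_insert d hI (Or.inr hctr') (le_of_lt hlt)
  have hne' : r' ≠ r := ne_of_lt hlt
  have H : ∀ n x, pvMu d x = n →
      pvRoot (d.insert r r') x = if pvRoot d x = r then r' else pvRoot d x := by
    intro n
    induction n using Nat.strong_induction_on with
    | _ n ih =>
      intro x hn
      by_cases hxr : x = r
      · subst hxr
        have hA : pvRoot d x = x := by rw [pvRoot_unfold d hI x, hr]; simp
        have hB : pvRoot (d.insert x r') r' = r' := by
          rw [pvRoot_unfold _ hI' r', PySem.Dict.get?_insert_of_ne d r' hne', hr']; simp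
        have hL : pvRoot (d.insert x r') x = pvRoot (d.insert x r') r' := by
          rw [pvRoot_unfold _ hI' x, PySem.Dict.get?_insert_self]; simp [hne']
        rw [hL, hB, hA]; simp
      · have hg : (d.insert r r').get? x = d.get? x := PySem.Dict.get?_insert_of_ne d r' hxr
        rw [pvRoot_unfold _ hI' x, pvRoot_unfold d hI x, hg]
        cases hx : d.get? x with
        | none => simp [hxr]
        | some p =>
          show (if p = x then x else pvRoot (d.insert r r') p)
              = if (if p = x then x else pvRoot d p) = r then r'
                else (if p = x then x else pvRoot d p)
          by_cases hpx : p = x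
          · simp [hpx, hxr]
          · rw [if_neg hpx, if_neg hpx]
            have hmu := pvMu_lt d hI hx hpx
            exact ih _ (hn ▸ hmu) p rfl
  exact H _ x rfl

lemma pvInv_union (d : PySem.Dict Int Int) (hI : pvInv d) {a b : Int}
    (ha : d.contains a = true) (hb : d.contains b = true) : pvInv (pvUnionA d a b) := by
  have hra := pvRoot_is_root d hI ha
  have hrb := pvRoot_is_root d hI hb
  have hca : d.contains (pvRoot d a) = true := by
    rw [PySem.Dict.contains_eq_isSome_get?, hra]; rfl
  have hcb : d.contains (pvRoot d b) = true := by
    rw [PySem.Dict.contains_eq_isSome_get?, hrb]; rfl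
  rw [show pvUnionA d a b = (if pvRoot d a < pvRoot d b
      then d.insert (pvRoot d b) (pvRoot d a) else d.insert (pvRoot d a) (pvRoot d b)) from rfl]
  split_ifs with h
  · exact pvInv_insert d hI (Or.inr hca) (le_of_lt h)
  · exact pvInv_insert d hI (Or.inr hcb) (le_of_not_gt h)

lemma pvRoot_union (d : PySem.Dict Int Int) (hI : pvInv d) {a b : Int}
    (ha : d.contains a = true) (hb : d.contains b = true) (x : Int) :
    pvRoot (pvUnionA d a b) x =
      (if pvRoot d x = pvRoot d a ∨ pvRoot d x = pvRoot d b
       then (if pvRoot d a < pvRoot d b then pvRoot d a else pvRoot d b)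
       else pvRoot d x) := by
  have hra := pvRoot_is_root d hI ha
  have hrb := pvRoot_is_root d hI hb
  rw [show pvUnionA d a b = (if pvRoot d a < pvRoot d b
      then d.insert (pvRoot d b) (pvRoot d a) else d.insert (pvRoot d a) (pvRoot d b)) from rfl]
  by_cases h : pvRoot d a < pvRoot d b
  · rw [if_pos h, pvRoot_redirect d hI hrb hra h x]
    have hne : pvRoot d a ≠ pvRoot d b := ne_of_lt h
    split_ifs <;> simp_all
  · rw [if_neg h]
    by_cases heq : pvRoot d a = pvRoot d b
    · have hdd : d.insert (pvRoot d a) (pvRoot d b) = d := by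
        apply PySem.Dict.ext
        have hc : d.contains (pvRoot d a) = true := by
          rw [PySem.Dict.contains_eq_isSome_get?, hra]; rfl
        rw [PySem.Dict.items_insert_of_contains d _ hc]
        conv_rhs => rw [← List.map_id d.items]
        apply List.map_congr_left
        intro p hp
        by_cases hpk : p.1 = pvRoot d a
        · have := PySem.Dict.get?_of_mem_items d (k := p.1) (v := p.2) (by simpa using hp) hI.1
          rw [hpk] at this
          rw [hra] at this
          have hp2 : p.2 = pvRoot d a := by
            rw [heq] at this ⊢
            exact (Option.some.injEq _ _).mp this.symm
          obtain ⟨p1, p2⟩ := p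
          simp_all
        · simp [hpk]
      rw [hdd]
      split_ifs with h1 <;> simp_all
    · have hlt : pvRoot d b < pvRoot d a := lt_of_le_of_ne (le_of_not_gt h) (Ne.symm heq)
      rw [pvRoot_redirect d hI hra hrb hlt x]
      split_ifs <;> simp_all

-- the simulation relation between A's forest and B's representative map
def pvSim (d rep : PySem.Dict Int Int) : Prop :=
  pvInv d ∧ rep.keys.Nodup ∧ (∀ x, rep.getD x x = pvRoot d x) ∧
    (∀ x, rep.contains x = d.contains x)

lemma pvSim_empty : pvSim PySem.Dict.empty PySem.Dict.empty := by
  have hI : pvInv PySem.Dict.empty := by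
    constructor
    · simp [PySem.Dict.keys, PySem.Dict.empty]
    · intro kv hkv; simp [PySem.Dict.empty] at hkv
  refine ⟨hI, by simp [PySem.Dict.keys, PySem.Dict.empty], ?_, fun x => rfl⟩
  intro x
  rw [pvRoot_of_not_contains _ hI (by simp [PySem.Dict.contains, PySem.Dict.empty])]
  simp [PySem.Dict.getD, PySem.Dict.get?, PySem.Dict.empty]

-- one edge step preserves the simulation
lemma pvSim_step (d rep : PySem.Dict Int Int) (h : pvSim d rep) (a b : Int) :
    pvSim (pvUnionA
            (let d₁ := if d.contains a then d else d.insert a a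
             if d₁.contains b then d₁ else d₁.insert b b) a b)
          (pvStepB rep a b) := by
  obtain ⟨hI, hnd, hval, hct⟩ := h
  -- the two conditional self-inserts on A's side
  set d₁ := if d.contains a then d else d.insert a a with hd₁
  set d₂ := if d₁.contains b then d₁ else d₁.insert b b with hd₂
  have hI1 : pvInv d₁ := by
    rw [hd₁]; split
    · exact hI
    · exact pvInv_insert d hI (Or.inl rfl) le_rfl
  have hR1 : ∀ x, pvRoot d₁ x = pvRoot d x := by
    intro x; rw [hd₁]; split
    · rfl
    · exact pvRoot_insert_self d hI (by simp_all) x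
  have hc1 : ∀ x, d₁.contains x = (x == a || d.contains x) := by
    intro x; rw [hd₁]; split
    · by_cases hxa : x = a <;> simp_all
    · rw [PySem.Dict.contains_insert]
  have hI2 : pvInv d₂ := by
    rw [hd₂]; split
    · exact hI1
    · exact pvInv_insert d₁ hI1 (Or.inl rfl) le_rfl
  have hR2 : ∀ x, pvRoot d₂ x = pvRoot d x := by
    intro x; rw [hd₂]; split
    · exact hR1 x
    · rw [pvRoot_insert_self d₁ hI1 (by simp_all) x]; exact hR1 x
  have hc2 : ∀ x, d₂.contains x = (x == b || x == a || d.contains x) := by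
    intro x; rw [hd₂]; split
    · rename_i hcb
      rw [hc1 x]
      by_cases hxb : x = b
      · have hb' := hcb
        rw [hc1 b] at hb'
        have hxb' : (x == b) = true := by simp [hxb]
        rw [Bool.or_assoc, hxb', Bool.true_or, hxb, hb']
      · have hxb' : (x == b) = false := by simp [hxb]
        rw [Bool.or_assoc, hxb', Bool.false_or]
    · rw [PySem.Dict.contains_insert, hc1 x, Bool.or_assoc]
  have hca2 : d₂.contains a = true := by rw [hc2]; simp
  have hcb2 : d₂.contains b = true := by rw [hc2]; simp
  have hI3 : pvInv (pvUnionA d₂ a b) := pvInv_union d₂ hI2 hca2 hcb2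
  have hR3 : ∀ x, pvRoot (pvUnionA d₂ a b) x =
      (if pvRoot d x = pvRoot d a ∨ pvRoot d x = pvRoot d b
       then (if pvRoot d a < pvRoot d b then pvRoot d a else pvRoot d b)
       else pvRoot d x) := by
    intro x
    rw [pvRoot_union d₂ hI2 hca2 hcb2 x, hR2, hR2, hR2]
  -- roots of a and b are keys of d₂
  have hka : d₂.contains (pvRoot d a) = true := by
    rw [PySem.Dict.contains_eq_isSome_get?, ← hR2 a, pvRoot_is_root d₂ hI2 hca2]; rfl
  have hkb : d₂.contains (pvRoot d b) = true := by
    rw [PySem.Dict.contains_eq_isSome_get?, ← hR2 b, pvRoot_is_root d₂ hI2 hcb2]; rfl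
  -- the union step does not change the key set
  have hc3 : ∀ x, (pvUnionA d₂ a b).contains x = d₂.contains x := by
    intro x
    rw [show pvUnionA d₂ a b = (if pvRoot d₂ a < pvRoot d₂ b
        then d₂.insert (pvRoot d₂ b) (pvRoot d₂ a) else d₂.insert (pvRoot d₂ a) (pvRoot d₂ b)) from rfl]
    rw [hR2 a, hR2 b]
    split
    · rw [PySem.Dict.contains_insert]
      by_cases hx : x = pvRoot d b
      · subst hx; simp [hkb]
      · simp [hx]
    · rw [PySem.Dict.contains_insert]
      by_cases hx : x = pvRoot d a
      · subst hx; simp [hka]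
      · simp [hx]
  -- B's side
  rw [show pvStepB rep a b = ((PySem.Dict.mk (rep.items.map (fun kv : Int × Int =>
      (kv.1, if kv.2 = rep.getD a a ∨ kv.2 = rep.getD b b
             then (if rep.getD a a < rep.getD b b then rep.getD a a else rep.getD b b)
             else kv.2)))).insert a (if rep.getD a a < rep.getD b b then rep.getD a a else rep.getD b b)).insert b
        (if rep.getD a a < rep.getD b b then rep.getD a a else rep.getD b b) from rfl]
  rw [hval a, hval b]
  set m := if pvRoot d a < pvRoot d b then pvRoot d a else pvRoot d b with hm
  set rep₁ : PySem.Dict Int Int := PySem.Dict.mk (rep.items.map (fun kv =>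
      (kv.1, if kv.2 = pvRoot d a ∨ kv.2 = pvRoot d b then m else kv.2))) with hrep₁
  have hkeys1 : rep₁.keys = rep.keys := by
    rw [hrep₁]
    simp [PySem.Dict.keys, List.map_map, Function.comp_def]
  have hnd1 : rep₁.keys.Nodup := by rw [hkeys1]; exact hnd
  have hcr1 : ∀ x, rep₁.contains x = rep.contains x := by
    intro x
    rw [PySem.Dict.contains_eq_decide_mem_keys, PySem.Dict.contains_eq_decide_mem_keys, hkeys1]
  refine ⟨hI3, ?_, ?_, ?_⟩
  · exact PySem.Dict.nodup_keys_insert _ _ _ (PySem.Dict.nodup_keys_insert _ _ _ hnd1)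
  · intro x
    by_cases hxb : x = b
    · subst hxb
      rw [PySem.Dict.getD_insert]
      rw [if_pos rfl, hR3 x]
      simp
    · rw [PySem.Dict.getD_insert, if_neg hxb]
      by_cases hxa : x = a
      · subst hxa
        rw [PySem.Dict.getD_insert, if_pos rfl, hR3 x]
        simp
      · rw [PySem.Dict.getD_insert, if_neg hxa, hR3 x]
        cases hcx : rep.contains x with
        | true =>
          -- x is a key of rep: its mapped item gives the new value
          obtain ⟨v, hv⟩ : ∃ v, rep.get? x = some v := by
            cases hgx : rep.get? x with
            | none => rw [PySem.Dict.get?_eq_none_iff_contains] at hgx; rw [hgx] at hcx; cases hcx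
            | some v => exact ⟨v, rfl⟩
          have hvx : rep.getD x x = v := PySem.Dict.getD_of_get?_eq_some rep x hv
          have hmem : (x, v) ∈ rep.items := PySem.Dict.mem_items_of_get?_eq_some rep hv
          have hmem1 : (x, if v = pvRoot d a ∨ v = pvRoot d b then m else v) ∈ rep₁.items := by
            rw [hrep₁]
            exact List.mem_map_of_mem hmem
          rw [PySem.Dict.getD_of_mem_items rep₁ hmem1 hnd1 x]
          rw [← hval x, hvx]
        | false =>
          have hgd1 : rep₁.getD x x = x :=
            PySem.Dict.getD_of_not_contains rep₁ x (by rw [hcr1 x]; exact hcx)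
          rw [hgd1]
          have hdx : d.contains x = false := by rw [← hct x]; exact hcx
          have hrx : pvRoot d x = x := pvRoot_of_not_contains d hI hdx
          have hd2x : d₂.contains x = false := by
            rw [hc2 x]
            simp [hxa, hxb, hdx]
          have hxra : x ≠ pvRoot d a := by
            intro hcon; rw [← hcon] at hka; rw [hka] at hd2x; cases hd2x
          have hxrb : x ≠ pvRoot d b := by
            intro hcon; rw [← hcon] at hkb; rw [hkb] at hd2x; cases hd2x
          rw [hrx, if_neg (by tauto)]
  · intro x
    rw [hc3 x, hc2 x, PySem.Dict.contains_insert, PySem.Dict.contains_insert, hcr1 x, hct x,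
      Bool.or_assoc]

lemma pvSim_foldl (edges : List (Int × Int)) :
    ∀ (d rep : PySem.Dict Int Int), pvSim d rep →
      pvSim (edges.foldl (fun nodes e =>
              let nodes := if nodes.contains e.1 then nodes else nodes.insert e.1 e.1
              let nodes := if nodes.contains e.2 then nodes else nodes.insert e.2 e.2
              pvUnionA nodes e.1 e.2) d)
            (edges.foldl (fun rep e => pvStepB rep e.1 e.2) rep) := by
  induction edges with
  | nil => intro d rep h; exact h
  | cons e rest ih =>
    intro d rep h
    exact ih _ _ (pvSim_step d rep h e.1 e.2)

-- the terminals loop of A only appends pvRoot values (self-inserts do not change them)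
lemma pvRootsLoop (de : PySem.Dict Int Int) :
    ∀ (ts : List Int) (d : PySem.Dict Int Int) (acc : List Int), pvInv d →
      (∀ x, pvRoot d x = pvRoot de x) →
      (ts.foldl (fun (st : PySem.Dict Int Int × List Int) t =>
        let nodes := if st.1.contains t then st.1 else st.1.insert t t
        (nodes, st.2 ++ [pvFindA nodes (nodes.size + 1) t])) (d, acc)).2
        = acc ++ ts.map (pvRoot de) := by
  intro ts
  induction ts with
  | nil => intro d acc _ _; simp
  | cons t rest ih =>
    intro d acc hI hd
    rw [List.foldl_cons, List.map_cons]
    have hsplit : (let nodes := if d.contains t then d else d.insert t t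
        (nodes, acc ++ [pvFindA nodes (nodes.size + 1) t]))
        = ((if d.contains t then d else d.insert t t),
           acc ++ [pvRoot (if d.contains t then d else d.insert t t) t]) := rfl
    rw [hsplit]
    have hI' : pvInv (if d.contains t then d else d.insert t t) := by
      split
      · exact hI
      · exact pvInv_insert d hI (Or.inl rfl) le_rfl
    have hR' : ∀ x, pvRoot (if d.contains t then d else d.insert t t) x = pvRoot de x := by
      intro x
      split
      · exact hd x
      · rename_i hnc
        rw [pvRoot_insert_self d hI (by simp_all) x]
        exact hd x
    rw [ih _ _ hI' hR', hR' t]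
    simp

lemma pvSetOfMap_len_one (f : Int → Int) (t0 : Int) (rest : List Int) :
    ((PySem.Set.ofList ((t0 :: rest).map f)).length = 1) ↔ ∀ t ∈ rest, f t = f t0 := by
  rw [List.map_cons, PySem.Set.ofList_cons, List.length_cons]
  constructor
  · intro h1 t ht
    have h0 : ((PySem.Set.ofList (rest.map f)).discard (f t0)) = [] :=
      List.eq_nil_of_length_eq_zero (by omega)
    by_contra hne
    have hm : f t ∈ (PySem.Set.ofList (rest.map f)).discard (f t0) := by
      rw [PySem.Set.mem_discard]
      exact ⟨(PySem.Set.mem_ofList _ _).mpr (List.mem_map_of_mem ht), hne⟩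
    rw [h0] at hm
    cases hm
  · intro hall
    have h0 : ((PySem.Set.ofList (rest.map f)).discard (f t0)) = [] := by
      rw [List.eq_nil_iff_forall_not_mem]
      intro y hy
      rw [PySem.Set.mem_discard, PySem.Set.mem_ofList, List.mem_map] at hy
      obtain ⟨⟨t, ht, rfl⟩, hne⟩ := hy
      exact hne (hall t ht)
    rw [h0]
    rfl

lemma pvFinal (terminals : List Int) (d rep : PySem.Dict Int Int) (hI : pvInv d)
    (hval : ∀ x, rep.getD x x = pvRoot d x) :
    (if (PySem.Set.ofList ((terminals.foldl (fun (st : PySem.Dict Int Int × List Int) t =>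
        let nodes := if st.1.contains t then st.1 else st.1.insert t t
        (nodes, st.2 ++ [pvFindA nodes (nodes.size + 1) t])) (d, [])).2)).length = 1
     then true else false)
    = (match terminals with
       | [] => false
       | t0 :: _ => terminals.all (fun t => rep.getD t t == rep.getD t0 t0)) := by
  rw [pvRootsLoop d terminals d [] hI (fun x => rfl), List.nil_append]
  cases terminals with
  | nil => simp [PySem.Set.ofList]
  | cons t0 rest =>
    show _ = (t0 :: rest).all (fun t => rep.getD t t == rep.getD t0 t0)
    by_cases hc : ∀ t ∈ rest, pvRoot d t = pvRoot d t0
    · rw [if_pos ((pvSetOfMap_len_one (pvRoot d) t0 rest).mpr hc)]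
      symm
      rw [List.all_eq_true]
      intro t ht
      rw [List.mem_cons] at ht
      rcases ht with rfl | ht
      · simp
      · simp [hval, hc t ht]
    · rw [if_neg (fun hcon => hc ((pvSetOfMap_len_one (pvRoot d) t0 rest).mp hcon))]
      symm
      rw [← Bool.not_eq_true, List.all_eq_true]
      intro hcon
      apply hc
      intro t ht
      have := hcon t (List.mem_cons_of_mem t0 ht)
      simpa [hval] using this

-- ===== VERDICT (by name: the statement is the Claim_ definition above) =====
theorem cal_feasibility_spec : Claim_equal_cal_feasibility := by
  intro edges terminals _
  show cal_feasibility edges terminals = cal_feasibility_alt edges terminals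
  obtain ⟨hIe, -, hval, -⟩ := pvSim_foldl edges PySem.Dict.empty PySem.Dict.empty pvSim_empty
  exact pvFinal terminals _ _ hIe hval
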